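-- pv_equiv track=rewrite | github.com/DavidMueller1/master-thesis-jupyter-plots | stateCounter.py | count_privacy_state_changes
-- ===== SOURCE A (Python) =====
-- def count_privacy_state_changes(data):
--     # Dictionary to store the count of privacy state changes for each uniqueId
--     privacy_state_changes = {}
--
--     for record in data:
--         unique_id = record["uniqueId"]
--         privacy_state = record["privacyState"]
--
--         # Initialize the dictionary entry if not present
--         if unique_id not in privacy_state_changes:
--             privacy_state_changes[unique_id] = {
--                 "last_privacy_state": privacy_state,
--                 "change_count": 0
--             }
--         else:
--             # Check if the privacyState has changed compared to the last recorded state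
--             if privacy_state_changes[unique_id]["last_privacy_state"] != privacy_state:
--                 privacy_state_changes[unique_id]["change_count"] += 1
--                 privacy_state_changes[unique_id]["last_privacy_state"] = privacy_state
--
--     # Extract only the change counts for the final output
--     change_counts = {unique_id: info["change_count"] for unique_id, info in privacy_state_changes.items()}
--
--     return change_counts
-- ===== SOURCE B (Python) =====
-- def count_privacy_state_changes(data):
--     # Group each uniqueId's privacyState values in input order, then count
--     # adjacent differing pairs per group.
--     groups = {}
--     for record in data:
--         unique_id = record["uniqueId"]
--         privacy_state = record["privacyState"]
--         groups.setdefault(unique_id, []).append(privacy_state)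
--     return {uid: sum(1 for a, b in zip(states, states[1:]) if a != b)
--             for uid, states in groups.items()}
-- ===== Notes on version B (the rewrite author's own statement) =====
-- stated objective: alternative
-- what changed: B replaces A's on-line state machine (dict of last-state/counter records updated per record) with a two-phase group-then-count: first group each uniqueId's privacyState values in order, then count adjacent differing pairs per group.
import Mathlib
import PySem

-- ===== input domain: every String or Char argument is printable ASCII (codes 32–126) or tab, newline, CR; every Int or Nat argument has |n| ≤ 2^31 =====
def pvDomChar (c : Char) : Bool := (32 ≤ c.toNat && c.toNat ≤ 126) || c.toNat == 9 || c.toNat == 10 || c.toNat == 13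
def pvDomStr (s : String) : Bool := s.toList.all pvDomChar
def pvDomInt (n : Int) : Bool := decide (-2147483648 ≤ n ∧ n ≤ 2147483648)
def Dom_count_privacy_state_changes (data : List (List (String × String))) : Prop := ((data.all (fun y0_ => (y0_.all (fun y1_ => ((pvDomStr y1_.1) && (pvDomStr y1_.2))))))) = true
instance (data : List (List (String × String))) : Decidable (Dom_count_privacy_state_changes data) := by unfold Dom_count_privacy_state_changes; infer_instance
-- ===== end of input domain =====

-- B replaces A's on-line last-state/counter state machine with a two-phase
-- group-then-count (group states per uniqueId, then count adjacent differing
-- pairs); objective: alternative decomposition, same O(n) cost.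

-- record["k"]: first-match lookup in the association list (shared by both ports)
def pvLookup (r : List (String × String)) (k : String) : Option String :=
  (r.find? (fun p => p.1 == k)).map (·.2)

-- ===== PORT A =====
-- one iteration of A's loop over `data`
def pvStepA (d : PySem.Dict String (String × Int)) (r : List (String × String)) :
    PySem.Dict String (String × Int) :=
  let uid := (pvLookup r "uniqueId").getD ""
  let ps := (pvLookup r "privacyState").getD ""
  if d.contains uid = false then
    d.insert uid (ps, 0)
  else
    let info := d.getD uid ("", 0)
    if info.1 ≠ ps then d.insert uid (ps, info.2 + 1) else d

def count_privacy_state_changes (data : List (List (String × String))) : List (String × Int) :=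
  ((data.foldl pvStepA PySem.Dict.empty).items.map (fun p => (p.1, p.2.2)))

-- ===== PORT B =====
-- sum(1 for a, b in zip(states, states[1:]) if a != b)
def pvChg (states : List String) : Int :=
  (((states.zip (states.drop 1)).filter (fun p => !(p.1 == p.2))).length : Int)

-- one iteration of B's grouping loop: groups.setdefault(uid, []).append(ps)
def pvStepB (g : PySem.Dict String (List String)) (r : List (String × String)) :
    PySem.Dict String (List String) :=
  let uid := (pvLookup r "uniqueId").getD ""
  let ps := (pvLookup r "privacyState").getD ""
  g.modify uid [] (· ++ [ps])

def count_privacy_state_changes_alt (data : List (List (String × String))) : List (String × Int) :=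
  ((data.foldl pvStepB PySem.Dict.empty).items.map (fun p => (p.1, pvChg p.2)))

-- ===== PRECONDITION & SPEC =====
-- Pre_ excludes records missing the "uniqueId" or "privacyState" key, on which
-- the Python A raises KeyError.
def Pre_count_privacy_state_changes (data : List (List (String × String))) : Prop :=
  ∀ r ∈ data, (pvLookup r "uniqueId").isSome = true ∧ (pvLookup r "privacyState").isSome = true
instance (data : List (List (String × String))) : Decidable (Pre_count_privacy_state_changes data) := by
  unfold Pre_count_privacy_state_changes; infer_instance

def pvWitness_count_privacy_state_changes : (List (List (String × String))) :=
  [[("uniqueId", "a"), ("privacyState", "p")], [("uniqueId", "a"), ("privacyState", "q")]]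

def Spec_count_privacy_state_changes (data : List (List (String × String))) (out : List (String × Int)) : Prop := out = count_privacy_state_changes_alt data
instance (data : List (List (String × String))) (out : List (String × Int)) : Decidable (Spec_count_privacy_state_changes data out) := by unfold Spec_count_privacy_state_changes; infer_instance

-- ===== CLAIM (what is proved, stated in full; the proofs are below) =====
def Claim_equal_count_privacy_state_changes : Prop := ∀ (data : List (List (String × String))), Dom_count_privacy_state_changes data → Pre_count_privacy_state_changes data → Spec_count_privacy_state_changes data (count_privacy_state_changes data)

-- ===== LEMMAS AND PROOFS =====

-- abstraction of a group of states to A's (last_privacy_state, change_count) record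
def pvAbs (states : List String) : String × Int := (states.getLastD "", pvChg states)

-- invariant tying A's dict to B's grouping dict
def pvInv (a : PySem.Dict String (String × Int)) (b : PySem.Dict String (List String)) : Prop :=
  b.keys.Nodup ∧ (∀ p ∈ b.items, p.2 ≠ []) ∧
    a.items = b.items.map (fun p => (p.1, pvAbs p.2))

lemma pv_zip_append (s : List String) (x : String) (h : s ≠ []) :
    (s ++ [x]).zip ((s ++ [x]).drop 1) = s.zip (s.drop 1) ++ [(s.getLastD "", x)] := by
  induction s with
  | nil => exact absurd rfl h
  | cons a t ih =>
    cases t with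
    | nil => simp [List.zip]
    | cons b t' =>
      have := ih (by simp)
      simp only [List.cons_append, List.drop_succ_cons, List.drop_zero] at this ⊢
      simp [List.zip_cons_cons, this]

lemma pvChg_append (s : List String) (x : String) (h : s ≠ []) :
    pvChg (s ++ [x]) = pvChg s + (if s.getLastD "" = x then 0 else 1) := by
  unfold pvChg
  rw [pv_zip_append s x h, List.filter_append]
  by_cases hx : s.getLastD "" = x
  · rw [if_pos hx]
    simp only [List.getLastD_eq_getLast?] at hx
    simp [hx]
  · rw [if_neg hx]
    simp only [List.getLastD_eq_getLast?] at hx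
    simp [hx]

lemma pvAbs_append (s : List String) (x : String) (h : s ≠ []) :
    pvAbs (s ++ [x]) = (x, pvChg s + (if s.getLastD "" = x then 0 else 1)) := by
  unfold pvAbs
  rw [pvChg_append s x h, List.getLastD_concat]

lemma pvInv_step (a : PySem.Dict String (String × Int)) (b : PySem.Dict String (List String))
    (r : List (String × String)) (hI : pvInv a b) : pvInv (pvStepA a r) (pvStepB b r) := by
  obtain ⟨hnd, hne, hitems⟩ := hI
  set uid := (pvLookup r "uniqueId").getD "" with huid
  set ps := (pvLookup r "privacyState").getD "" with hps
  have hkeys : a.keys = b.keys := by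
    show a.items.map (·.1) = b.items.map (·.1)
    rw [hitems, List.map_map]; rfl
  have hcont : a.contains uid = b.contains uid := by
    rw [PySem.Dict.contains_eq_decide_mem_keys, PySem.Dict.contains_eq_decide_mem_keys, hkeys]
  have hstepB : pvStepB b r = b.insert uid (b.getD uid [] ++ [ps]) := rfl
  have hAeq : pvStepA a r =
      (if a.contains uid = false then a.insert uid (ps, 0)
       else if (a.getD uid ("", 0)).1 ≠ ps then a.insert uid (ps, (a.getD uid ("", 0)).2 + 1)
       else a) := rfl
  by_cases hc : b.contains uid = true
  · -- key present in both dicts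
    obtain ⟨states, hget⟩ : ∃ s, b.get? uid = some s := by
      have := PySem.Dict.contains_eq_isSome_get? (d := b) (k := uid)
      rw [hc] at this
      exact Option.isSome_iff_exists.mp this.symm
    have hmem : (uid, states) ∈ b.items := PySem.Dict.mem_items_of_get?_eq_some b hget
    have hsne : states ≠ [] := hne _ hmem
    have hgetD : b.getD uid [] = states := PySem.Dict.getD_of_mem_items b hmem hnd []
    have hamem : (uid, pvAbs states) ∈ a.items := by
      rw [hitems]; exact List.mem_map_of_mem hmem
    have hand : a.keys.Nodup := by rw [hkeys]; exact hnd
    have hagetD : a.getD uid ("", 0) = pvAbs states :=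
      PySem.Dict.getD_of_mem_items a hamem hand ("", 0)
    have hac : a.contains uid = true := by rw [hcont]; exact hc
    -- pin down any b-item with key uid
    have hpin : ∀ p ∈ b.items, p.1 = uid → p = (uid, states) := by
      intro p hp hpk
      have hinj := List.inj_on_of_nodup_map (f := fun p : String × List String => p.1)
        (l := b.items) (by exact hnd)
      exact hinj hp hmem (by simpa using hpk)
    have hB' : (pvStepB b r).items =
        b.items.map (fun p => if p.1 == uid then (uid, states ++ [ps]) else p) := by
      rw [hstepB, hgetD, PySem.Dict.items_insert_of_contains b _ hc]
    refine ⟨?_, ?_, ?_⟩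
    · rw [show pvStepB b r = b.modify uid [] (· ++ [ps]) from rfl,
        PySem.Dict.keys_modify, PySem.Dict.keys_insert_of_contains b _ hc]
      exact hnd
    · intro p hp
      rw [hB'] at hp
      obtain ⟨q, hq, hqe⟩ := List.mem_map.mp hp
      by_cases h1 : (q.1 == uid) = true
      · rw [if_pos h1] at hqe
        simp [← hqe]
      · rw [if_neg h1] at hqe
        rw [← hqe]; exact hne _ hq
    · -- items equation
      rw [hAeq, if_neg (by simp [hac]), hagetD, hB', List.map_map]
      by_cases hch : (pvAbs states).1 = ps
      · -- state unchanged: A leaves dict alone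
        rw [if_neg (not_not_intro hch), hitems]
        have hlast : states.getLastD "" = ps := hch
        have habs : pvAbs (states ++ [ps]) = pvAbs states := by
          rw [pvAbs_append states ps hsne, if_pos hlast, add_zero]
          unfold pvAbs; rw [hlast]
        apply List.map_congr_left
        intro p hp
        by_cases h1 : p.1 = uid
        · rw [hpin p hp h1]
          simp [Function.comp, habs]
        · simp [Function.comp, h1]
      · -- state changed: A records the new state and bumps the counter
        rw [if_pos hch, PySem.Dict.items_insert_of_contains a _ hac, hitems, List.map_map]
        have hlast : ¬ states.getLastD "" = ps := hch
        have habs : pvAbs (states ++ [ps]) = (ps, (pvAbs states).2 + 1) := by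
          rw [pvAbs_append states ps hsne, if_neg hlast]
          rfl
        apply List.map_congr_left
        intro p hp
        by_cases h1 : p.1 = uid
        · rw [hpin p hp h1]
          simp [Function.comp, habs]
        · simp [Function.comp, h1]
  · -- fresh key: both append a new entry
    have hcf : b.contains uid = false := by simpa using hc
    have hac : a.contains uid = false := by rw [hcont]; exact hcf
    have hgetD : b.getD uid [] = [] := PySem.Dict.getD_of_not_contains b [] hcf
    refine ⟨?_, ?_, ?_⟩
    · rw [show pvStepB b r = b.modify uid [] (· ++ [ps]) from rfl,
        PySem.Dict.keys_modify, PySem.Dict.keys_insert_of_not_contains b _ hcf]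
      refine List.Nodup.append hnd (List.nodup_singleton _) ?_
      intro x hx hx2
      rw [List.mem_singleton] at hx2
      subst hx2
      have hco := (PySem.Dict.contains_iff_mem_keys b uid).mpr hx
      rw [hco] at hcf; exact absurd hcf (by simp)
    · intro p hp
      rw [hstepB, hgetD, PySem.Dict.items_insert_of_not_contains b _ hcf] at hp
      rcases List.mem_append.mp hp with h | h
      · exact hne _ h
      · simp at h; simp [h]
    · rw [hAeq, if_pos hac, PySem.Dict.items_insert_of_not_contains a _ hac,
        hstepB, hgetD, List.nil_append, PySem.Dict.items_insert_of_not_contains b _ hcf,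
        List.map_append, hitems]
      rfl

lemma pvInv_foldl (data : List (List (String × String)))
    (a : PySem.Dict String (String × Int)) (b : PySem.Dict String (List String))
    (hI : pvInv a b) : pvInv (data.foldl pvStepA a) (data.foldl pvStepB b) := by
  induction data generalizing a b with
  | nil => exact hI
  | cons r t ih => exact ih _ _ (pvInv_step a b r hI)

-- ===== VERDICT (by name: the statement is the Claim_ definition above) =====
theorem count_privacy_state_changes_spec : Claim_equal_count_privacy_state_changes := by
  intro data _ _
  show count_privacy_state_changes data = count_privacy_state_changes_alt data
  have h := pvInv_foldl data PySem.Dict.empty PySem.Dict.empty ⟨List.nodup_nil, by intro p hp; exact (List.not_mem_nil hp).elim, rfl⟩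
  obtain ⟨-, -, hitems⟩ := h
  unfold count_privacy_state_changes count_privacy_state_changes_alt
  rw [hitems, List.map_map]
  rfl
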